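-- pv_equiv track=rewrite | github.com/cmbi/kmad-web | kman_web/services/convert.py | encode_lcrs
-- ===== SOURCE A (Python) =====
-- def encode_lcrs(seq, lcrs):
--     for i, lcrI in enumerate(lcrs):   # pragma: no cover
--         start = lcrI[0]
--         end = lcrI[1]
--         lcr_code = "L"
--         k = 0
--         j = 0
--         while j < end + 1 and k < len(seq):
--             if k % 7 == 1 and j >= start:
--                 seq[k] = lcr_code
--             elif k % 7 == 0 and seq[k] != "-":
--                 j += 1
--             k += 1
--     return seq
-- ===== SOURCE B (Python) =====
-- def encode_lcrs(seq, lcrs):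
--     bounds = [(iv[0], iv[1]) for iv in lcrs]
--     count = 0
--     for k in range(len(seq)):
--         r = k % 7
--         if r == 0 and seq[k] != "-":
--             count += 1
--         elif r == 1 and any(s <= count <= e for s, e in bounds):
--             seq[k] = "L"
--     return seq
-- ===== Notes on version B (the rewrite author's own statement) =====
-- stated objective: alternative
-- what changed: B replaces A's per-interval restart of the stateful k/j scan over seq by one single pass over seq that tracks the residue count and marks a code slot when any interval's [start,end] contains the current count.
import Mathlib
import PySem

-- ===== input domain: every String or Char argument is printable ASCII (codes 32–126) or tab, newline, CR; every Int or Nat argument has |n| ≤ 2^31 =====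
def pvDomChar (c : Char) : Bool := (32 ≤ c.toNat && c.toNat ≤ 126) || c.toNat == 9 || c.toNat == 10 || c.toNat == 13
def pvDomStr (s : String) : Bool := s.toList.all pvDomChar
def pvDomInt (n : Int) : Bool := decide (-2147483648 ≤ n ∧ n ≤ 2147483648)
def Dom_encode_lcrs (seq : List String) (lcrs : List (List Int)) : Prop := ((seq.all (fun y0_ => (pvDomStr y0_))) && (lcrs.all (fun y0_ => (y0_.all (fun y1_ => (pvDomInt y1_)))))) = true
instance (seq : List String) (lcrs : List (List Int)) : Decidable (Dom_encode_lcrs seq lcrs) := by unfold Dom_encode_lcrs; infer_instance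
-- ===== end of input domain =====

-- B replaces A's per-interval restart of the k/j scan over seq by a single pass that
-- tracks the residue count and marks a slot when any interval contains it (objective:
-- alternative; same worst-case cost). Both A and B mutate seq in place in Python; the
-- equivalence proved here is about the returned value.

-- ===== PORT A =====
-- inner while loop of A; fuel bounds the iteration count (k grows by 1 each step and
-- the loop requires k < s.length, so fuel = s.length from k = 0 is exact)
def encodeLcrsWhile (start e : Int) : Nat → Int → Nat → List String → List String
  | 0, _, _, s => s
  | fuel+1, j, k, s =>
    if j < e + 1 ∧ k < s.length then
      if k % 7 = 1 ∧ start ≤ j then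
        encodeLcrsWhile start e fuel j (k+1) (s.set k "L")
      else if k % 7 = 0 ∧ s.getD k "" ≠ "-" then
        encodeLcrsWhile start e fuel (j+1) (k+1) s
      else
        encodeLcrsWhile start e fuel j (k+1) s
    else s

def encode_lcrs (seq : List String) (lcrs : List (List Int)) : List String :=
  lcrs.foldl (fun s iv =>
    encodeLcrsWhile ((PySem.List.pyGet? iv 0).getD 0) ((PySem.List.pyGet? iv 1).getD 0)
      s.length 0 0 s) seq

-- ===== PORT B =====
-- `any(s <= count <= e for s, e in bounds)` of Source B
def hitB (bounds : List (Int × Int)) (c : Int) : Bool :=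
  bounds.any (fun b => decide (b.1 ≤ c) && decide (c ≤ b.2))

-- one iteration of Source B's single `for k in range(len(seq))` pass
def bStep (bounds : List (Int × Int)) (acc : Int × List String) (k : Nat) : Int × List String :=
  if k % 7 = 0 ∧ acc.2.getD k "" ≠ "-" then (acc.1 + 1, acc.2)
  else if k % 7 = 1 ∧ hitB bounds acc.1 then (acc.1, acc.2.set k "L")
  else acc

def encode_lcrs_alt (seq : List String) (lcrs : List (List Int)) : List String :=
  let bounds := lcrs.map (fun iv => ((PySem.List.pyGet? iv 0).getD 0, (PySem.List.pyGet? iv 1).getD 0))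
  ((List.range seq.length).foldl (bStep bounds) ((0 : Int), seq)).2

-- ===== PRECONDITION & SPEC =====
-- Pre_ excludes only inputs on which Python A raises (IndexError: an interval with
-- fewer than two entries); B raises there as well.
def Pre_encode_lcrs (seq : List String) (lcrs : List (List Int)) : Prop :=
  ∀ iv ∈ lcrs, 2 ≤ iv.length
instance (seq : List String) (lcrs : List (List Int)) : Decidable (Pre_encode_lcrs seq lcrs) := by
  unfold Pre_encode_lcrs; infer_instance

def pvWitness_encode_lcrs : List String × List (List Int) :=
  (["M", "", "-", "-", "-", "-", "-", "A", "", "-", "-", "-", "-", "-", "-", "", "-", "-", "-", "-", "-"], [[1, 2]])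

def Spec_encode_lcrs (seq : List String) (lcrs : List (List Int)) (out : List String) : Prop := out = encode_lcrs_alt seq lcrs
instance (seq : List String) (lcrs : List (List Int)) (out : List String) : Decidable (Spec_encode_lcrs seq lcrs out) := by unfold Spec_encode_lcrs; infer_instance

-- ===== CLAIM (what is proved, stated in full; the proofs are below) =====
def Claim_equal_encode_lcrs : Prop := ∀ (seq : List String) (lcrs : List (List Int)), Dom_encode_lcrs seq lcrs → Pre_encode_lcrs seq lcrs → Spec_encode_lcrs seq lcrs (encode_lcrs seq lcrs)

-- ===== LEMMAS AND PROOFS =====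

-- number of residue slots (index ≡ 0 mod 7) before position k holding a non-"-" entry:
-- the value of A's j and of Source B's count when the scan reaches position k
def cntI (s : List String) (k : Nat) : Int :=
  (((List.range k).filter (fun i => decide (i % 7 = 0 ∧ s.getD i "" ≠ "-"))).length : Int)

-- u is s with "L" written exactly at the code slots selected by P
def Marked (s u : List String) (P : Nat → Prop) [DecidablePred P] : Prop :=
  u.length = s.length ∧
  ∀ i, u.getD i "" = if i < s.length ∧ i % 7 = 1 ∧ P i then "L" else s.getD i ""

theorem cntI_succ (s : List String) (k : Nat) :
    cntI s (k+1) = cntI s k + (if k % 7 = 0 ∧ s.getD k "" ≠ "-" then 1 else 0) := by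
  unfold cntI
  rw [List.range_succ, List.filter_append, List.length_append]
  push_cast
  congr 1
  by_cases h : k % 7 = 0 ∧ s.getD k "" ≠ "-"
  · rw [if_pos h]
    simp only [List.filter_cons, List.filter_nil, decide_eq_true_eq]
    rw [if_pos h]
    simp
  · rw [if_neg h]
    simp only [List.filter_cons, List.filter_nil, decide_eq_true_eq]
    rw [if_neg h]
    simp

theorem cntI_mono (s : List String) {k m : Nat} (h : k ≤ m) : cntI s k ≤ cntI s m := by
  induction m, h using Nat.le_induction with
  | base => exact le_refl _
  | succ m hm ih => rw [cntI_succ]; split_ifs <;> omega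

theorem getD_set (s : List String) (k i : Nat) (x : String) :
    (s.set k x).getD i "" = if k = i ∧ k < s.length then x else s.getD i "" := by
  rw [List.getD_eq_getElem?_getD, List.getD_eq_getElem?_getD, List.getElem?_set]
  by_cases h1 : k = i
  · subst h1
    by_cases h2 : k < s.length <;> simp [h2]
  · simp [h1]

theorem cntI_set_not0 (s : List String) {k : Nat} (x : String) (h : k % 7 ≠ 0) (m : Nat) :
    cntI (s.set k x) m = cntI s m := by
  unfold cntI
  congr 1
  refine congrArg _ (List.filter_congr ?_)
  intro i _
  by_cases hik : k = i
  · subst hik; simp [h]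
  · simp [hik]

theorem eq_of_getD {u v : List String} (hl : u.length = v.length)
    (h : ∀ i, u.getD i "" = v.getD i "") : u = v := by
  apply List.ext_getElem hl
  intro i h1 h2
  have hi := h i
  rwa [List.getD_eq_getElem u "" h1, List.getD_eq_getElem v "" h2] at hi

theorem marked_cnt {s u : List String} {P : Nat → Prop} [DecidablePred P]
    (h : Marked s u P) (m : Nat) : cntI u m = cntI s m := by
  unfold cntI
  congr 1
  refine congrArg _ (List.filter_congr ?_)
  intro i _
  by_cases h7 : i % 7 = 0
  · have hne : ¬(i < s.length ∧ i % 7 = 1 ∧ P i) := by rintro ⟨_, h1, _⟩; omega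
    have := h.2 i
    rw [if_neg hne] at this
    rw [this]
  · simp [h7]

theorem marked_congr {s u : List String} {P Q : Nat → Prop} [DecidablePred P] [DecidablePred Q]
    (hPQ : ∀ i, i < s.length → i % 7 = 1 → (P i ↔ Q i)) (h : Marked s u P) : Marked s u Q := by
  refine ⟨h.1, fun i => ?_⟩
  rw [h.2 i]
  by_cases hl : i < s.length
  · by_cases h7 : i % 7 = 1
    · exact if_congr (and_congr Iff.rfl (and_congr Iff.rfl (hPQ i hl h7))) rfl rfl
    · simp [h7]
  · simp [hl]

theorem marked_comp {s u t : List String} {P Q : Nat → Prop} [DecidablePred P] [DecidablePred Q]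
    (h1 : Marked s u P) (h2 : Marked u t Q) : Marked s t (fun i => P i ∨ Q i) := by
  refine ⟨h2.1.trans h1.1, fun i => ?_⟩
  have e2 := h2.2 i
  rw [h1.1] at e2
  rw [e2, h1.2 i]
  by_cases hl : i < s.length <;> by_cases h7 : i % 7 = 1 <;>
    by_cases hp : P i <;> by_cases hq : Q i <;> simp [hl, h7, hp, hq]

theorem marked_eq {s u v : List String} {P Q : Nat → Prop} [DecidablePred P] [DecidablePred Q]
    (h1 : Marked s u P) (h2 : Marked s v Q)
    (hPQ : ∀ i, i < s.length → i % 7 = 1 → (P i ↔ Q i)) : u = v := by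
  refine eq_of_getD (h1.1.trans h2.1.symm) (fun i => ?_)
  rw [h1.2 i, h2.2 i]
  by_cases hl : i < s.length
  · by_cases h7 : i % 7 = 1
    · exact if_congr (and_congr Iff.rfl (and_congr Iff.rfl (hPQ i hl h7))) rfl rfl
    · simp [h7]
  · simp [hl]

theorem marked_set {s : List String} {k : Nat} (hk : k < s.length) (h7 : k % 7 = 1) :
    Marked s (s.set k "L") (fun i => i = k) := by
  refine ⟨List.length_set, fun i => ?_⟩
  rw [getD_set]
  by_cases hik : k = i
  · subst hik; simp [hk, h7]
  · have : ¬(i < s.length ∧ i % 7 = 1 ∧ i = k) := by rintro ⟨_, _, rfl⟩; exact hik rfl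
    simp [hik, hk, this]

theorem awhile_inv (start e : Int) :
    ∀ (fuel : Nat) (j : Int) (k : Nat) (s : List String), s.length ≤ k + fuel → j = cntI s k →
    Marked s (encodeLcrsWhile start e fuel j k s)
      (fun i => k ≤ i ∧ start ≤ cntI s i ∧ cntI s i ≤ e) := by
  intro fuel
  induction fuel with
  | zero =>
    intro j k s hlen hj
    rw [encodeLcrsWhile]
    refine ⟨rfl, fun i => ?_⟩
    rw [if_neg]
    rintro ⟨h1, _, hk, _⟩
    omega
  | succ fuel ih =>
    intro j k s hlen hj
    rw [encodeLcrsWhile]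
    by_cases hc : j < e + 1 ∧ k < s.length
    · rw [if_pos hc]
      by_cases hb1 : k % 7 = 1 ∧ start ≤ j
      · rw [if_pos hb1]
        have h7 : k % 7 ≠ 0 := by omega
        have hset : Marked s (s.set k "L") (fun i => i = k) := marked_set hc.2 hb1.1
        have hj' : j = cntI (s.set k "L") (k+1) := by
          rw [cntI_set_not0 s "L" h7, cntI_succ, if_neg (by intro h; exact h7 h.1)]
          omega
        have hrec := ih j (k+1) (s.set k "L") (by rw [List.length_set]; omega) hj'
        have hrec' : Marked (s.set k "L") (encodeLcrsWhile start e fuel j (k+1) (s.set k "L"))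
            (fun i => k+1 ≤ i ∧ start ≤ cntI s i ∧ cntI s i ≤ e) := by
          refine marked_congr (fun i _ _ => ?_) hrec
          rw [cntI_set_not0 s "L" h7]
        have hcomp := marked_comp hset hrec'
        refine marked_congr (fun i _ _ => ?_) hcomp
        constructor
        · rintro (rfl | ⟨hki, hrest⟩)
          · exact ⟨le_refl _, by rw [← hj]; exact hb1.2, by rw [← hj]; omega⟩
          · exact ⟨by omega, hrest⟩
        · rintro ⟨hki, hrest⟩
          by_cases hik : i = k
          · exact Or.inl hik
          · exact Or.inr ⟨by omega, hrest⟩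
      · rw [if_neg hb1]
        by_cases hb2 : k % 7 = 0 ∧ s.getD k "" ≠ "-"
        · rw [if_pos hb2]
          have hj' : j + 1 = cntI s (k+1) := by rw [cntI_succ, if_pos hb2]; omega
          have hrec := ih (j+1) (k+1) s (by omega) hj'
          refine marked_congr (fun i _ hi7 => ?_) hrec
          constructor
          · rintro ⟨hki, hrest⟩; exact ⟨by omega, hrest⟩
          · rintro ⟨hki, hrest⟩
            have : i ≠ k := by intro hik; subst hik; omega
            exact ⟨by omega, hrest⟩
        · rw [if_neg hb2]
          have hj' : j = cntI s (k+1) := by rw [cntI_succ, if_neg hb2]; omega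
          have hrec := ih j (k+1) s (by omega) hj'
          refine marked_congr (fun i _ hi7 => ?_) hrec
          constructor
          · rintro ⟨hki, hrest⟩; exact ⟨by omega, hrest⟩
          · rintro ⟨hki, hrest⟩
            have hik : i ≠ k := by
              intro hik; subst hik
              by_cases h7 : i % 7 = 1
              · exact hb1 ⟨h7, by rw [hj]; exact hrest.1⟩
              · omega
            exact ⟨by omega, hrest⟩
    · rw [if_neg hc]
      refine ⟨rfl, fun i => ?_⟩
      rw [if_neg]
      rintro ⟨hil, hi7, hki, hs, hce⟩
      rcases not_and_or.mp hc with hje | hkl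
      · have hmono := cntI_mono s hki
        omega
      · omega

theorem afold_inv (lcrs : List (List Int)) :
    ∀ (s : List String),
    Marked s (lcrs.foldl (fun s iv =>
        encodeLcrsWhile ((PySem.List.pyGet? iv 0).getD 0) ((PySem.List.pyGet? iv 1).getD 0)
          s.length 0 0 s) s)
      (fun i => ∃ iv ∈ lcrs,
        (PySem.List.pyGet? iv 0).getD 0 ≤ cntI s i ∧ cntI s i ≤ (PySem.List.pyGet? iv 1).getD 0) := by
  induction lcrs with
  | nil =>
    intro s
    refine ⟨rfl, fun i => ?_⟩
    rw [if_neg]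
    · rfl
    · rintro ⟨_, _, iv, hiv, _⟩
      simp at hiv
  | cons iv ivs ih =>
    intro s
    rw [List.foldl_cons]
    have h1 := awhile_inv ((PySem.List.pyGet? iv 0).getD 0) ((PySem.List.pyGet? iv 1).getD 0)
        s.length 0 0 s (by omega) (by simp [cntI])
    have ih' := ih (encodeLcrsWhile ((PySem.List.pyGet? iv 0).getD 0)
        ((PySem.List.pyGet? iv 1).getD 0) s.length 0 0 s)
    have hcnt := marked_cnt h1
    have ih'' : Marked (encodeLcrsWhile ((PySem.List.pyGet? iv 0).getD 0)
        ((PySem.List.pyGet? iv 1).getD 0) s.length 0 0 s)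
        (ivs.foldl (fun s iv =>
          encodeLcrsWhile ((PySem.List.pyGet? iv 0).getD 0) ((PySem.List.pyGet? iv 1).getD 0)
            s.length 0 0 s) (encodeLcrsWhile ((PySem.List.pyGet? iv 0).getD 0)
          ((PySem.List.pyGet? iv 1).getD 0) s.length 0 0 s))
        (fun i => ∃ iv' ∈ ivs,
          (PySem.List.pyGet? iv' 0).getD 0 ≤ cntI s i ∧ cntI s i ≤ (PySem.List.pyGet? iv' 1).getD 0) := by
      refine marked_congr (fun i _ _ => ?_) ih'
      rw [hcnt i]
    have hcomp := marked_comp h1 ih''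
    refine marked_congr (fun i _ _ => ?_) hcomp
    constructor
    · rintro (⟨_, ha, hb⟩ | ⟨iv', hiv', h'⟩)
      · exact ⟨iv, List.mem_cons_self, ha, hb⟩
      · exact ⟨iv', List.mem_cons_of_mem _ hiv', h'⟩
    · rintro ⟨iv', hiv', h'⟩
      rcases List.mem_cons.mp hiv' with rfl | hm
      · exact Or.inl ⟨Nat.zero_le _, h'⟩
      · exact Or.inr ⟨iv', hm, h'⟩

theorem bpass_inv (bounds : List (Int × Int)) (s : List String) :
    ∀ (m : Nat), m ≤ s.length →
    ((List.range m).foldl (bStep bounds) ((0 : Int), s)).1 = cntI s m ∧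
    Marked s ((List.range m).foldl (bStep bounds) ((0 : Int), s)).2
      (fun i => i < m ∧ hitB bounds (cntI s i) = true) := by
  intro m
  induction m with
  | zero =>
    intro _
    refine ⟨by simp [cntI], ⟨rfl, fun i => ?_⟩⟩
    rw [if_neg]
    · rfl
    · rintro ⟨_, _, h0, _⟩
      omega
  | succ m ih =>
    intro hm
    obtain ⟨hc, hM⟩ := ih (by omega)
    rw [List.range_succ, List.foldl_append, List.foldl_cons, List.foldl_nil]
    set st := (List.range m).foldl (bStep bounds) ((0 : Int), s) with hst
    have hgm : st.2.getD m "" = s.getD m "" := by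
      rw [hM.2 m, if_neg]
      rintro ⟨_, _, hmm, _⟩
      omega
    unfold bStep
    by_cases hb1 : m % 7 = 0 ∧ st.2.getD m "" ≠ "-"
    · rw [if_pos hb1]
      refine ⟨?_, ?_⟩
      · show st.1 + 1 = cntI s (m+1)
        rw [cntI_succ, if_pos ⟨hb1.1, by rw [← hgm]; exact hb1.2⟩, hc]
      · show Marked s st.2 _
        refine marked_congr (fun i _ hi7 => ?_) hM
        constructor
        · rintro ⟨hi, hh⟩
          exact ⟨by omega, hh⟩
        · rintro ⟨hi, hh⟩
          have : i ≠ m := by intro h; subst h; omega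
          exact ⟨by omega, hh⟩
    · rw [if_neg hb1]
      by_cases hb2 : m % 7 = 1 ∧ hitB bounds st.1 = true
      · rw [if_pos hb2]
        refine ⟨?_, ?_⟩
        · show st.1 = cntI s (m+1)
          rw [cntI_succ, if_neg (by rintro ⟨h0, _⟩; omega)]
          omega
        · show Marked s (st.2.set m "L") _
          have hlen : m < st.2.length := by rw [hM.1]; omega
          have hset := marked_set hlen hb2.1
          have hcomp := marked_comp hM hset
          refine marked_congr (fun i _ hi7 => ?_) hcomp
          constructor
          · rintro (⟨hi, hh⟩ | rfl)
            · exact ⟨by omega, hh⟩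
            · exact ⟨by omega, by rw [← hc]; exact hb2.2⟩
          · rintro ⟨hi, hh⟩
            by_cases him : i = m
            · exact Or.inr him
            · exact Or.inl ⟨by omega, hh⟩
      · rw [if_neg hb2]
        refine ⟨?_, ?_⟩
        · rw [cntI_succ, if_neg (by rintro ⟨h0, hne⟩; exact hb1 ⟨h0, by rw [hgm]; exact hne⟩)]
          exact hc
        · refine marked_congr (fun i _ hi7 => ?_) hM
          constructor
          · rintro ⟨hi, hh⟩
            exact ⟨by omega, hh⟩
          · rintro ⟨hi, hh⟩
            have him : i ≠ m := by
              intro h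
              subst h
              exact hb2 ⟨hi7, by rw [hc]; exact hh⟩
            exact ⟨by omega, hh⟩

-- ===== VERDICT (by name: the statement is the Claim_ definition above) =====
theorem encode_lcrs_spec : Claim_equal_encode_lcrs := by
  intro seq lcrs _ _
  show encode_lcrs seq lcrs = encode_lcrs_alt seq lcrs
  have hA := afold_inv lcrs seq
  have hB := (bpass_inv (lcrs.map (fun iv =>
      ((PySem.List.pyGet? iv 0).getD 0, (PySem.List.pyGet? iv 1).getD 0))) seq
      seq.length (le_refl _)).2
  unfold encode_lcrs encode_lcrs_alt
  refine marked_eq hA hB (fun i hil _ => ?_)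
  constructor
  · rintro ⟨iv, hiv, h1, h2⟩
    refine ⟨hil, ?_⟩
    simp only [hitB, List.any_map, List.any_eq_true]
    exact ⟨iv, hiv, by simp [h1, h2]⟩
  · rintro ⟨_, hh⟩
    simp only [hitB, List.any_map, List.any_eq_true] at hh
    obtain ⟨iv, hiv, h'⟩ := hh
    simp only [Function.comp, Bool.and_eq_true, decide_eq_true_eq] at h'
    exact ⟨iv, hiv, h'.1, h'.2⟩
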